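-- pv_equiv track=rewrite | github.com/tn3w/is-crawler | is_crawler/detection.py | _grab_name_sequence
-- ===== SOURCE A (Python) =====
-- _NAME_CHARS = frozenset(
--     "abcdefghijklmnopqrstuvwxyzABCDEFGHIJKLMNOPQRSTUVWXYZ0123456789_.-"
-- )
--
-- def _name_chars_end(s: str, start: int) -> int:
--     j = start
--     while j < len(s) and s[j] in _NAME_CHARS:
--         j += 1
--     return j
--
-- def _strip_version(token: str) -> str:
--     return token.split("/", 1)[0]
--
-- def _is_name_start(c: str) -> bool:
--     return "A" <= c <= "Z"
--
-- def _grab_name_sequence(ua: str, start: int) -> tuple[int, str]: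
--     end = _name_chars_end(ua, start)
--     name = ua[start:end]
--
--     while end + 1 < len(ua) and ua[end] == " " and _is_name_start(ua[end + 1]):
--         next_end = _name_chars_end(ua, end + 1)
--         name += " " + ua[end + 1 : next_end]
--         end = next_end
--
--     return end, _strip_version(name)
-- ===== SOURCE B (Python) =====
-- _NAME_CHARS = frozenset(
--     "abcdefghijklmnopqrstuvwxyzABCDEFGHIJKLMNOPQRSTUVWXYZ0123456789_.-"
-- )
--
-- def _grab_name_sequence(ua, start):
--     # Anchored one-pass automaton for  NAME (' ' UPPER NAME)*  starting at `start`: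
--     # a single character loop with two transitions; the name is one final slice.
--     n = len(ua)
--     i = start
--     end = start            # end of the last completed token
--     while i < n:
--         c = ua[i]
--         if c in _NAME_CHARS:
--             i += 1
--             end = i
--         elif c == " " and i + 1 < n and "A" <= ua[i + 1] <= "Z":
--             i += 2
--             end = i
--         else:
--             break
--     return end, ua[start:end]
-- ===== Notes on version B (the rewrite author's own statement) =====
-- stated objective: alternative
-- what changed: Replaces A's token-rescan structure (helper scan for a whole name-chars run, an outer while that rescans and concatenates ' '+token onto an accumulator string, then a '/'-split) by a single anchored character-level automaton: one loop with two transitions (name char: advance and mark end; space before an uppercase: skip two) and the name produced by one final slice ua[start:end] with no string building and no strip. Pre_ restricts to the natural domain 0 <= start.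
-- outside the precondition, e.g. on _grab_name_sequence('A B', -3): A returns (3, 'A  B'), B returns (3, 'A B')
import Mathlib
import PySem

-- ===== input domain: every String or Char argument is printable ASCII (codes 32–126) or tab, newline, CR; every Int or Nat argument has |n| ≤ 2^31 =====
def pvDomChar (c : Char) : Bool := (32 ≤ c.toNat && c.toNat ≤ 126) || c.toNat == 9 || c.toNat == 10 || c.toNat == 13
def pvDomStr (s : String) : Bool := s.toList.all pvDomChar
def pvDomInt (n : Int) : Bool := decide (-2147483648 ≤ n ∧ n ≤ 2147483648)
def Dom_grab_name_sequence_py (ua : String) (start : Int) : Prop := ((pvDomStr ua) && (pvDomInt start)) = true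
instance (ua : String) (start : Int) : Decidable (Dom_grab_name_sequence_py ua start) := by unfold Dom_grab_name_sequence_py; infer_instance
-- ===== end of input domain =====

-- B replaces A's token-rescan-and-concatenate structure by a single character-level
-- automaton with a final slice; same cost, different decomposition (return value only).

-- ===== PORT A =====
-- _NAME_CHARS (module constant shared by both Pythons)
def nameChars : List Char := "abcdefghijklmnopqrstuvwxyzABCDEFGHIJKLMNOPQRSTUVWXYZ0123456789_.-".toList

-- _name_chars_end: j = start; while j < len(s) and s[j] in _NAME_CHARS: j += 1; return j
-- (s[j]: PySem.List.pyGetD; the default '/' is only reached where Python raises IndexError, outside Pre_)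
def name_chars_end_py (cs : List Char) (j : Int) : Int :=
  if h : j < (cs.length : Int) ∧ PySem.List.pyGetD cs j '/' ∈ nameChars then
    name_chars_end_py cs (j + 1)
  else j
termination_by ((cs.length : Int) - j).toNat
decreasing_by have := h.1; omega

-- needed by grab_loop_py's termination (the port cites it by name)
theorem name_chars_end_ge (cs : List Char) (j : Int) : j ≤ name_chars_end_py cs j := by
  fun_induction name_chars_end_py cs j with
  | case1 j h ih => omega
  | case2 j h => omega

-- _strip_version: token.split("/", 1)[0]  (exact: the prefix before the first '/')
def strip_version_py (t : List Char) : List Char := t.takeWhile (fun c => c != '/')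

-- _is_name_start: "A" <= c <= "Z"
def is_name_start_py (c : Char) : Bool := decide ('A' ≤ c) && decide (c ≤ 'Z')

-- the while loop of _grab_name_sequence, state (end, name)
def grab_loop_py (cs : List Char) (e : Int) (nm : List Char) : Int × List Char :=
  if h : e + 1 < (cs.length : Int) ∧ PySem.List.pyGetD cs e '/' = ' ' ∧
         is_name_start_py (PySem.List.pyGetD cs (e + 1) '/') = true then
    let next := name_chars_end_py cs (e + 1)
    grab_loop_py cs next (nm ++ ' ' :: PySem.List.slice cs (some (e + 1)) (some next))
  else (e, nm)
termination_by ((cs.length : Int) - e).toNat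
decreasing_by have := name_chars_end_ge cs (e + 1); have := h.1; omega

def grab_name_sequence_py (ua : String) (start : Int) : Int × String :=
  let cs := ua.toList
  let e0 := name_chars_end_py cs start
  let nm0 := PySem.List.slice cs (some start) (some e0)
  let r := grab_loop_py cs e0 nm0
  (r.1, String.mk (strip_version_py r.2))

-- ===== PORT B =====
-- B's single while loop: state (i, end); two transitions (name char / space before uppercase)
def dfa_loop_alt (cs : List Char) (i : Int) (e : Int) : Int :=
  if hlt : i < (cs.length : Int) then
    if PySem.List.pyGetD cs i '/' ∈ nameChars then
      dfa_loop_alt cs (i + 1) (i + 1)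
    else if PySem.List.pyGetD cs i '/' = ' ' ∧ i + 1 < (cs.length : Int) ∧
            ('A' ≤ PySem.List.pyGetD cs (i + 1) '/' ∧ PySem.List.pyGetD cs (i + 1) '/' ≤ 'Z') then
      dfa_loop_alt cs (i + 2) (i + 2)
    else e
  else e
termination_by ((cs.length : Int) - i).toNat
decreasing_by all_goals omega

def grab_name_sequence_py_alt (ua : String) (start : Int) : Int × String :=
  let cs := ua.toList
  let e := dfa_loop_alt cs start start
  (e, String.mk (PySem.List.slice cs (some start) (some e)))

-- ===== PRECONDITION & SPEC =====
-- Pre_ restricts to the function's natural domain, 0 ≤ start (a scan position): for negative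
-- start both programs read ua[j] with negative j, which Python indexes from the end of the
-- string (IndexError whenever start < -len(ua)); they usually agree there but A's concatenated
-- name can differ from B's slice, so nothing is claimed outside the natural domain.
def Pre_grab_name_sequence_py (ua : String) (start : Int) : Prop := 0 ≤ start
instance (ua : String) (start : Int) : Decidable (Pre_grab_name_sequence_py ua start) := by unfold Pre_grab_name_sequence_py; infer_instance

def pvWitness_grab_name_sequence_py : String × Int := ("Mozilla Firefox rv:2", 0)

def Spec_grab_name_sequence_py (ua : String) (start : Int) (out : Int × String) : Prop := out = grab_name_sequence_py_alt ua start
instance (ua : String) (start : Int) (out : Int × String) : Decidable (Spec_grab_name_sequence_py ua start out) := by unfold Spec_grab_name_sequence_py; infer_instance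

-- ===== CLAIM (what is proved, stated in full; the proofs are below) =====
def Claim_equal_grab_name_sequence_py : Prop := ∀ (ua : String) (start : Int), Dom_grab_name_sequence_py ua start → Pre_grab_name_sequence_py ua start → Spec_grab_name_sequence_py ua start (grab_name_sequence_py ua start)

-- ===== LEMMAS AND PROOFS =====

theorem space_not_mem : ' ' ∉ nameChars := by decide
theorem slash_not_mem : '/' ∉ nameChars := by decide

theorem upper_mem_nameChars (c : Char) (h1 : 'A' ≤ c) (h2 : c ≤ 'Z') : c ∈ nameChars := by
  have hv1 : 65 ≤ c.toNat := by simpa [Char.le_def, UInt32.le_iff_toNat_le] using h1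
  have hv2 : c.toNat ≤ 90 := by simpa [Char.le_def, UInt32.le_iff_toNat_le] using h2
  have hc : c = Char.ofNat c.toNat := by simp [Char.ofNat_toNat]
  rw [hc]
  interval_cases h : c.toNat <;> decide

theorem dfa_loop_ge (cs : List Char) (i e : Int) (h : e ≤ i) : e ≤ dfa_loop_alt cs i e := by
  fun_induction dfa_loop_alt cs i e with
  | case1 i e hlt hmem ih => have := ih (by omega); omega
  | case2 i e hlt hmem hsp ih => have := ih (by omega); omega
  | case3 i e _ _ _ => omega
  | case4 i e _ => omega

-- B's run from a fresh token boundary first absorbs exactly a name-chars run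
theorem dfa_eq_nce (cs : List Char) (j : Int) :
    dfa_loop_alt cs j j = dfa_loop_alt cs (name_chars_end_py cs j) (name_chars_end_py cs j) := by
  fun_induction name_chars_end_py cs j with
  | case1 j h ih =>
    rw [← ih]
    rw [dfa_loop_alt]
    simp [h.1, h.2]
  | case2 j h => rfl

theorem nce_idem (cs : List Char) (j : Int) :
    name_chars_end_py cs (name_chars_end_py cs j) = name_chars_end_py cs j := by
  fun_induction name_chars_end_py cs j with
  | case1 j h ih => exact ih
  | case2 j h => rw [name_chars_end_py]; simp [h]

theorem boundary_not_mem (cs : List Char) (e : Int) (hb : name_chars_end_py cs e = e)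
    (hl : e < (cs.length : Int)) : PySem.List.pyGetD cs e '/' ∉ nameChars := by
  intro hmem
  have hstep : name_chars_end_py cs e = name_chars_end_py cs (e + 1) := by
    conv_lhs => rw [name_chars_end_py]
    simp [hl, hmem]
  have := name_chars_end_ge cs (e + 1)
  omega

theorem slice_empty (cs : List Char) (a : Int) (h : 0 ≤ a) :
    PySem.List.slice cs (some a) (some a) = [] := by
  rw [PySem.List.slice_toNat cs h h]; simp

theorem slice_cons (cs : List Char) (a b : Int) (h0 : 0 ≤ a) (hn : a < (cs.length : Int))
    (hb : a < b) :
    PySem.List.slice cs (some a) (some b) =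
      cs[a.toNat]'(by omega) :: PySem.List.slice cs (some (a + 1)) (some b) := by
  rw [PySem.List.slice_toNat cs h0 (by omega), PySem.List.slice_toNat cs (by omega) (by omega)]
  have h1 : b.toNat - a.toNat = (b.toNat - (a + 1).toNat) + 1 := by omega
  have h2 : (a + 1).toNat = a.toNat + 1 := by omega
  rw [List.drop_eq_getElem_cons (by omega), h1, List.take_succ_cons, h2]

theorem slice_append (cs : List Char) (a m b : Int) (h0 : 0 ≤ a) (ham : a ≤ m) (hmb : m ≤ b) :
    PySem.List.slice cs (some a) (some m) ++ PySem.List.slice cs (some m) (some b) =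
      PySem.List.slice cs (some a) (some b) := by
  rw [PySem.List.slice_toNat cs h0 (by omega), PySem.List.slice_toNat cs (by omega) (by omega),
      PySem.List.slice_toNat cs h0 (by omega)]
  have h1 : b.toNat - a.toNat = (m.toNat - a.toNat) + (b.toNat - m.toNat) := by omega
  rw [h1, List.take_add]
  congr 1
  rw [List.drop_drop]
  congr 2
  omega

-- the in-range pyGetD is the list element
theorem pyGetD_elem (cs : List Char) (i : Int) (h0 : 0 ≤ i) (hn : i < (cs.length : Int)) :
    PySem.List.pyGetD cs i '/' = cs[i.toNat]'(by omega) :=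
  PySem.List.pyGetD_eq_getElem cs '/' h0 hn

-- every char B's automaton walks over is a name char, a space, or an uppercase letter — never '/'
theorem dfa_slice_no_slash' (cs : List Char) (i e : Int) :
    0 ≤ i → e = i → ∀ c ∈ PySem.List.slice cs (some i) (some (dfa_loop_alt cs i e)), c ≠ '/' := by
  fun_induction dfa_loop_alt cs i e with
  | case1 i e hlt hmem ih =>
    intro h0 _
    have hge : i + 1 ≤ dfa_loop_alt cs (i + 1) (i + 1) := dfa_loop_ge cs (i + 1) (i + 1) le_rfl
    rw [slice_cons cs i _ h0 hlt (by omega)]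
    intro c hc
    rcases List.mem_cons.mp hc with h | h
    · subst h
      rw [pyGetD_elem cs i h0 hlt] at hmem
      intro hcon; rw [hcon] at hmem; exact slash_not_mem hmem
    · exact ih (by omega) rfl c h
  | case2 i e hlt hmem hsp ih =>
    intro h0 _
    have hge : i + 2 ≤ dfa_loop_alt cs (i + 2) (i + 2) := dfa_loop_ge cs (i + 2) (i + 2) le_rfl
    obtain ⟨hspc, hlt1, hA, hZ⟩ := hsp
    rw [slice_cons cs i _ h0 hlt (by omega), slice_cons cs (i + 1) _ (by omega) hlt1 (by omega)]
    intro c hc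
    rcases List.mem_cons.mp hc with h | h
    · subst h; rw [pyGetD_elem cs i h0 hlt] at hspc; rw [hspc]; decide
    rcases List.mem_cons.mp h with h | h
    · subst h
      rw [pyGetD_elem cs (i + 1) (by omega) hlt1] at hA
      intro hcon; rw [hcon] at hA; exact absurd hA (by decide)
    · have hrw : (i : Int) + 1 + 1 = i + 2 := by ring
      rw [hrw] at h
      exact ih (by omega) rfl c h
  | case3 i e hlt _ _ =>
    intro h0 he; subst he; rw [slice_empty _ _ h0]; simp
  | case4 i e hlt =>
    intro h0 he; subst he; rw [slice_empty _ _ h0]; simp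

theorem dfa_slice_no_slash (cs : List Char) (i : Int) (h0 : 0 ≤ i) :
    ∀ c ∈ PySem.List.slice cs (some i) (some (dfa_loop_alt cs i i)), c ≠ '/' :=
  dfa_slice_no_slash' cs i i h0 rfl

-- main loop correspondence: from a token boundary, A's token loop and B's automaton agree,
-- and A's accumulated name is B's slice
theorem grab_loop_eq (cs : List Char) (e : Int) (nm : List Char) (h0 : 0 ≤ e)
    (hb : name_chars_end_py cs e = e) :
    grab_loop_py cs e nm =
      (dfa_loop_alt cs e e, nm ++ PySem.List.slice cs (some e) (some (dfa_loop_alt cs e e))) := by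
  fun_induction grab_loop_py cs e nm with
  | case1 e nm h next ih =>
    obtain ⟨hlt1, hspc, hup⟩ := h
    have hup' : 'A' ≤ PySem.List.pyGetD cs (e + 1) '/' ∧ PySem.List.pyGetD cs (e + 1) '/' ≤ 'Z' := by
      simpa [is_name_start_py, decide_eq_true_eq] using hup
    have hlt : e < (cs.length : Int) := by omega
    -- B takes the space transition at e
    have hB1 : dfa_loop_alt cs e e = dfa_loop_alt cs (e + 2) (e + 2) := by
      rw [dfa_loop_alt]
      simp only [hlt, dif_pos]
      rw [if_neg (by rw [hspc]; exact space_not_mem), if_pos ⟨hspc, hlt1, hup'⟩]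
    -- name_chars_end from e+1 first eats the uppercase letter at e+1
    have hnext : name_chars_end_py cs (e + 1) = name_chars_end_py cs (e + 2) := by
      conv_lhs => rw [name_chars_end_py]
      rw [dif_pos ⟨hlt1, upper_mem_nameChars _ hup'.1 hup'.2⟩]
      have hrw : (e : Int) + 1 + 1 = e + 2 := by ring
      rw [hrw]
    have hB : dfa_loop_alt cs e e =
        dfa_loop_alt cs (name_chars_end_py cs (e + 1)) (name_chars_end_py cs (e + 1)) := by
      rw [hB1, hnext, dfa_eq_nce cs (e + 2)]
    have hge1 : e + 1 ≤ name_chars_end_py cs (e + 1) := name_chars_end_ge cs (e + 1)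
    have hgeD : name_chars_end_py cs (e + 1) ≤ dfa_loop_alt cs e e := by
      rw [hB]; exact dfa_loop_ge cs _ _ le_rfl
    -- names: nm ++ ' ' :: slice (e+1) next ++ slice next D = nm ++ slice e D
    have h1 : PySem.List.slice cs (some (e + 1)) (some (name_chars_end_py cs (e + 1))) ++
        PySem.List.slice cs (some (name_chars_end_py cs (e + 1))) (some (dfa_loop_alt cs e e)) =
        PySem.List.slice cs (some (e + 1)) (some (dfa_loop_alt cs e e)) :=
      slice_append cs _ _ _ (by omega) hge1 hgeD
    have h2 : PySem.List.slice cs (some e) (some (dfa_loop_alt cs e e)) =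
        cs[e.toNat]'(by omega) :: PySem.List.slice cs (some (e + 1)) (some (dfa_loop_alt cs e e)) :=
      slice_cons cs e _ h0 hlt (by omega)
    have hsp2 : cs[e.toNat]'(by omega) = ' ' := by rw [← pyGetD_elem cs e h0 hlt]; exact hspc
    rw [ih (by omega) (nce_idem cs (e + 1)), ← hB, Prod.mk.injEq]
    refine ⟨rfl, ?_⟩
    rw [List.append_assoc, List.cons_append, h1, h2, hsp2]
  | case2 e nm h =>
    -- A's loop stops; B's automaton returns e too
    have hB : dfa_loop_alt cs e e = e := by
      rw [dfa_loop_alt]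
      by_cases hlt : e < (cs.length : Int)
      · simp only [hlt, dif_pos]
        rw [if_neg (boundary_not_mem cs e hb hlt), if_neg]
        intro ⟨hspc, hlt1, hA, hZ⟩
        exact h ⟨hlt1, hspc, by simp [is_name_start_py, decide_eq_true_eq]; exact ⟨hA, hZ⟩⟩
      · simp [hlt]
    rw [hB, slice_empty cs e h0]
    simp

-- ===== VERDICT (by name: the statement is the Claim_ definition above) =====
theorem grab_name_sequence_py_spec : Claim_equal_grab_name_sequence_py := by
  intro ua start _hDom hPre
  unfold Spec_grab_name_sequence_py grab_name_sequence_py grab_name_sequence_py_alt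
  set cs := ua.toList with hcs
  have h0 : (0 : Int) ≤ start := hPre
  have hge0 : start ≤ name_chars_end_py cs start := name_chars_end_ge cs start
  have hloop := grab_loop_eq cs (name_chars_end_py cs start)
      (PySem.List.slice cs (some start) (some (name_chars_end_py cs start)))
      (by omega) (nce_idem cs start)
  have hB : dfa_loop_alt cs (name_chars_end_py cs start) (name_chars_end_py cs start) =
      dfa_loop_alt cs start start := (dfa_eq_nce cs start).symm
  rw [hB] at hloop
  have hgeD : name_chars_end_py cs start ≤ dfa_loop_alt cs start start := by
    rw [← hB]; exact dfa_loop_ge cs _ _ le_rfl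
  have hname : PySem.List.slice cs (some start) (some (name_chars_end_py cs start)) ++
      PySem.List.slice cs (some (name_chars_end_py cs start)) (some (dfa_loop_alt cs start start)) =
      PySem.List.slice cs (some start) (some (dfa_loop_alt cs start start)) :=
    slice_append cs _ _ _ h0 hge0 hgeD
  simp only [hloop, hname]
  rw [Prod.mk.injEq]
  refine ⟨rfl, ?_⟩
  · congr 1
    unfold strip_version_py
    apply List.takeWhile_eq_self_iff.mpr
    intro c hc
    have := dfa_slice_no_slash cs start h0 c hc
    simpa using this
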